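-- pv_equiv track=rewrite | github.com/DriesSmit/RGB-Agent | arcgym/utils/grid_utils.py | compute_grid_diff
-- ===== SOURCE A (Python) =====
-- from collections import defaultdict
--
-- def compute_grid_diff(old_grid: list, new_grid: list) -> str:
--     """Compute a compact diff between two grids, grouping by value change."""
--     if not old_grid or not new_grid:
--         return "(no previous state)"
--     groups = defaultdict(list)
--     for row_idx, (old_row, new_row) in enumerate(zip(old_grid, new_grid)):
--         for col_idx, (old_val, new_val) in enumerate(zip(old_row, new_row)):
--             if old_val != new_val:
--                 groups[(old_val, new_val)].append(f"({row_idx},{col_idx})")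
--     if not groups:
--         return "(no change)"
--     parts = []
--     for (old_val, new_val), coords in sorted(groups.items()):
--         parts.append(f"{old_val}->{new_val}: {', '.join(coords)}")
--     return "; ".join(parts)
-- ===== SOURCE B (Python) =====
-- def compute_grid_diff(old_grid: list, new_grid: list) -> str:
--     """Compute a compact diff between two grids, grouping by value change."""
--     if not old_grid or not new_grid:
--         return "(no previous state)"
--     diffs = [((o, n), f"({r},{c})")
--              for r, (orow, nrow) in enumerate(zip(old_grid, new_grid))
--              for c, (o, n) in enumerate(zip(orow, nrow))
--              if o != n]
--     if not diffs:
--         return "(no change)"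
--     diffs.sort(key=lambda e: e[0])
--     segments = []
--     for key, coord in diffs:
--         if segments and segments[-1][0] == key:
--             segments[-1][1].append(coord)
--         else:
--             segments.append((key, [coord]))
--     return "; ".join(f"{k[0]}->{k[1]}: {', '.join(cs)}" for k, cs in segments)
-- ===== Notes on version B (the rewrite author's own statement) =====
-- stated objective: alternative
-- what changed: Replaces the incrementally-maintained defaultdict of per-value-pair coordinate lists by a flat diff list that is stably sorted by the value-pair once and then grouped by a single adjacent-run scan.
import Mathlib
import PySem

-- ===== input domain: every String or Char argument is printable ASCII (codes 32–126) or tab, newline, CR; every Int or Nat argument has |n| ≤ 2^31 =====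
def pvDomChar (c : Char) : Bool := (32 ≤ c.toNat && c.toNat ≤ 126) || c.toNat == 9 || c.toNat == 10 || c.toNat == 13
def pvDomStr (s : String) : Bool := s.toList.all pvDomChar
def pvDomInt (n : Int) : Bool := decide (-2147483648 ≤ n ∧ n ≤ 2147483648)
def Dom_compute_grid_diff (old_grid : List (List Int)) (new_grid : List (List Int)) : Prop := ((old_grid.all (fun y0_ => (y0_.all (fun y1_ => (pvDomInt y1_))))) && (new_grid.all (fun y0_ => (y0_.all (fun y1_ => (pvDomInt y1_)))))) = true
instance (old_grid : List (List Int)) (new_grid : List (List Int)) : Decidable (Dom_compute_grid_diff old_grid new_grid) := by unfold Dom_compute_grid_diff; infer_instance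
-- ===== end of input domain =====

-- B replaces A's incrementally maintained defaultdict of coordinate lists by a flat diff list
-- that is stably sorted by the value-pair once and grouped by one adjacent-run scan
-- (objective: alternative).

-- ===== PORT A =====
-- A's 'sorted(groups.items())' compares Python tuples ((old,new), coords) lexicographically; dict
-- keys are distinct, so the coords lists are never compared and sorting by the two key components
-- (sorted2) is exact.
def compute_grid_diff (old_grid : List (List Int)) (new_grid : List (List Int)) : String :=
  if old_grid = [] ∨ new_grid = [] then "(no previous state)"
  else
    let groups : PySem.Dict (Int × Int) (List String) :=
      (PySem.List.enumerate (old_grid.zip new_grid)).foldl (fun d rp =>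
        (PySem.List.enumerate (rp.2.1.zip rp.2.2)).foldl (fun d cp =>
          if cp.2.1 ≠ cp.2.2 then
            d.modify (cp.2.1, cp.2.2) []
              (fun l => l ++ ["(" ++ PySem.Int.toStr rp.1 ++ "," ++ PySem.Int.toStr cp.1 ++ ")"])
          else d) d) PySem.Dict.empty
    if groups.items = [] then "(no change)"
    else
      let parts := (PySem.List.sorted2 groups.items (fun it => it.1.1) (fun it => it.1.2)).map
        (fun it => PySem.Int.toStr it.1.1 ++ "->" ++ PySem.Int.toStr it.1.2 ++ ": " ++
          PySem.Str.join ", " it.2)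
      PySem.Str.join "; " parts

-- ===== PORT B =====
-- B's grouping loop body: 'if segments and segments[-1][0] == key' appends the coordinate to the
-- last segment, else starts a new segment.
def pvGroupStep (segs : List ((Int × Int) × List String)) (p : (Int × Int) × String) :
    List ((Int × Int) × List String) :=
  match segs.getLast? with
  | some last => if last.1 == p.1 then segs.dropLast ++ [(last.1, last.2 ++ [p.2])]
                 else segs ++ [(p.1, [p.2])]
  | none => [(p.1, [p.2])]

def compute_grid_diff_alt (old_grid : List (List Int)) (new_grid : List (List Int)) : String :=
  if old_grid = [] ∨ new_grid = [] then "(no previous state)"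
  else
    let diffs : List ((Int × Int) × String) :=
      (PySem.List.enumerate (old_grid.zip new_grid)).flatMap (fun rp =>
        ((PySem.List.enumerate (rp.2.1.zip rp.2.2)).filter (fun cp => cp.2.1 ≠ cp.2.2)).map
          (fun cp => ((cp.2.1, cp.2.2),
            "(" ++ PySem.Int.toStr rp.1 ++ "," ++ PySem.Int.toStr cp.1 ++ ")")))
    if diffs = [] then "(no change)"
    else
      let sortedDiffs := PySem.List.sorted2 diffs (fun e => e.1.1) (fun e => e.1.2)
      let segments := sortedDiffs.foldl pvGroupStep []
      PySem.Str.join "; " (segments.map (fun kc =>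
        PySem.Int.toStr kc.1.1 ++ "->" ++ PySem.Int.toStr kc.1.2 ++ ": " ++
        PySem.Str.join ", " kc.2))

-- ===== PRECONDITION & SPEC =====
def Spec_compute_grid_diff (old_grid : List (List Int)) (new_grid : List (List Int)) (out : String) : Prop := out = compute_grid_diff_alt old_grid new_grid
instance (old_grid : List (List Int)) (new_grid : List (List Int)) (out : String) : Decidable (Spec_compute_grid_diff old_grid new_grid out) := by unfold Spec_compute_grid_diff; infer_instance

-- ===== CLAIM (what is proved, stated in full; the proofs are below) =====
def Claim_equal_compute_grid_diff : Prop := ∀ (old_grid : List (List Int)) (new_grid : List (List Int)), Dom_compute_grid_diff old_grid new_grid → Spec_compute_grid_diff old_grid new_grid (compute_grid_diff old_grid new_grid)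

-- ===== LEMMAS AND PROOFS =====

-- B's flat diff list.
def pvL (old_grid : List (List Int)) (new_grid : List (List Int)) : List ((Int × Int) × String) :=
  (PySem.List.enumerate (old_grid.zip new_grid)).flatMap (fun rp =>
    ((PySem.List.enumerate (rp.2.1.zip rp.2.2)).filter (fun cp => cp.2.1 ≠ cp.2.2)).map
      (fun cp => ((cp.2.1, cp.2.2),
        "(" ++ PySem.Int.toStr rp.1 ++ "," ++ PySem.Int.toStr cp.1 ++ ")")))

-- the dict-grouping step of A
def pvStep (d : PySem.Dict (Int × Int) (List String)) (p : (Int × Int) × String) :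
    PySem.Dict (Int × Int) (List String) :=
  d.modify p.1 [] (fun l => l ++ [p.2])

-- lexicographic order on value pairs (Python's tuple comparison)
def pvLex (a b : Int × Int) : Prop := a.1 < b.1 ∨ (a.1 = b.1 ∧ a.2 < b.2)
def pvBfK (a b : Int × Int) : Bool :=
  decide (a.1 < b.1) || (!decide (b.1 < a.1) && decide (a.2 < b.2))
def pvBfE (a b : (Int × Int) × String) : Bool := pvBfK a.1 b.1

theorem pvBfK_true_iff (a b : Int × Int) : pvBfK a b = true ↔ pvLex a b := by
  simp only [pvBfK, pvLex, Bool.or_eq_true, Bool.and_eq_true, Bool.not_eq_true',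
    decide_eq_true_eq, decide_eq_false_iff_not]
  omega

theorem pvBfK_false_iff (a b : Int × Int) : pvBfK a b = false ↔ ¬ pvLex a b := by
  rw [← pvBfK_true_iff]; simp

theorem pvLex_trans {a b c : Int × Int} (h1 : pvLex a b) (h2 : pvLex b c) : pvLex a c := by
  unfold pvLex at *; omega

theorem pvLex_irrefl (a : Int × Int) : ¬ pvLex a a := by
  unfold pvLex; omega

theorem pvLex_total {a b : Int × Int} (h : a ≠ b) : pvLex a b ∨ pvLex b a := by
  unfold pvLex
  rcases a with ⟨a1, a2⟩; rcases b with ⟨b1, b2⟩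
  simp only [ne_eq, Prod.mk.injEq, not_and] at h
  by_cases h1 : a1 = b1
  · have := h h1; omega
  · omega

theorem pvLex_ne {a b : Int × Int} (h : pvLex a b) : a ≠ b := by
  intro e; subst e; exact pvLex_irrefl a h

-- a guarded fold is the fold of the filtered-and-mapped list
theorem pv_foldl_if_filter_map {α β σ : Type} (P : α → Prop) [DecidablePred P]
    (g : α → β) (step : σ → β → σ) :
    ∀ (xs : List α) (s : σ),
      xs.foldl (fun s x => if P x then step s (g x) else s) s
        = ((xs.filter (fun x => decide (P x))).map g).foldl step s := by
  intro xs
  induction xs with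
  | nil => intro s; rfl
  | cons x xs ih =>
    intro s
    by_cases h : P x <;>
      simp [h, ih]

-- folding over a flatMap is a fold of folds
theorem pv_foldl_flatMap {α β σ : Type} (f : α → List β) (step : σ → β → σ) :
    ∀ (xs : List α) (s : σ),
      (xs.flatMap f).foldl step s = xs.foldl (fun s a => (f a).foldl step s) s := by
  intro xs
  induction xs with
  | nil => intro s; rfl
  | cons x xs ih =>
    intro s
    simp [List.flatMap_cons, List.foldl_append, ih]

-- A's nested dict-building loop is the flat fold over pvL
theorem pv_groups_eq (old_grid new_grid : List (List Int)) :
    (PySem.List.enumerate (old_grid.zip new_grid)).foldl (fun d rp =>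
        (PySem.List.enumerate (rp.2.1.zip rp.2.2)).foldl (fun d cp =>
          if cp.2.1 ≠ cp.2.2 then
            d.modify (cp.2.1, cp.2.2) []
              (fun l => l ++ ["(" ++ PySem.Int.toStr rp.1 ++ "," ++ PySem.Int.toStr cp.1 ++ ")"])
          else d) d) PySem.Dict.empty
      = (pvL old_grid new_grid).foldl pvStep PySem.Dict.empty := by
  unfold pvL
  rw [pv_foldl_flatMap]
  congr 1
  funext d rp
  exact pv_foldl_if_filter_map (fun cp : Int × Int × Int => cp.2.1 ≠ cp.2.2)
        (fun cp => ((cp.2.1, cp.2.2),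
          "(" ++ PySem.Int.toStr rp.1 ++ "," ++ PySem.Int.toStr cp.1 ++ ")")) pvStep _ d

-- keys of the grouping fold: the distinct value-pairs, first occurrence first
theorem pv_keys_eq (L : List ((Int × Int) × String)) :
    ((L.foldl pvStep PySem.Dict.empty).keys) = PySem.Set.ofList (L.map (fun p => p.1)) := by
  have h := PySem.Dict.keys_foldl_modify_key L (fun p => p.1) []
      (fun _ p => (fun l => l ++ [p.2])) PySem.Dict.empty
  unfold pvStep
  simpa [PySem.Dict.keys_empty, PySem.Set.update_nil_left] using h

theorem pv_keys_nodup (L : List ((Int × Int) × String)) :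
    ((L.foldl pvStep PySem.Dict.empty).keys).Nodup := by
  have h := PySem.Dict.nodup_keys_foldl_modify_key L (fun p => p.1) []
      (fun _ p => (fun l => l ++ [p.2])) PySem.Dict.empty
  unfold pvStep
  exact h (by simp)

theorem pv_items_eq (L : List ((Int × Int) × String)) :
    (L.foldl pvStep PySem.Dict.empty).items
      = (PySem.Set.ofList (L.map (fun p => p.1))).map
          (fun k => (k, (L.filter (fun p => p.1 == k)).map (fun p => p.2))) := by
  rw [PySem.Dict.items_eq_map_keys _ (pv_keys_nodup L) [], pv_keys_eq]
  refine List.map_congr_left (fun k _ => ?_)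
  have h := PySem.Dict.getD_foldl_modify_append L PySem.Dict.empty k
  unfold pvStep
  rw [h]
  simp

-- insertBy commutes with map when the comparison factors through the map
theorem pv_insertBy_map {α β : Type} (g : α → β) (bf : β → β → Bool) (bf' : α → α → Bool)
    (h : ∀ a b, bf (g a) (g b) = bf' a b) (x : α) :
    ∀ (ys : List α),
      PySem.List.insertBy bf (g x) (ys.map g) = (PySem.List.insertBy bf' x ys).map g := by
  intro ys
  induction ys with
  | nil => rfl
  | cons y ys ih =>
    simp only [List.map_cons, PySem.List.insertBy, h]
    by_cases hb : bf' x y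
    · simp [hb]
    · simp [hb, ih]

theorem pv_foldl_insertBy_map {α β : Type} (g : α → β) (bf : β → β → Bool)
    (bf' : α → α → Bool) (h : ∀ a b, bf (g a) (g b) = bf' a b) :
    ∀ (xs acc : List α),
      (xs.map g).foldl (fun acc x => PySem.List.insertBy bf x acc) (acc.map g)
        = (xs.foldl (fun acc x => PySem.List.insertBy bf' x acc) acc).map g := by
  intro xs
  induction xs with
  | nil => intro acc; rfl
  | cons x xs ih =>
    intro acc
    simp only [List.map_cons, List.foldl_cons]
    rw [pv_insertBy_map g bf bf' h x acc, ih]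

theorem pv_sorted2_map {α β : Type} (g : α → β)
    (K1 K2 : β → Int) (k1 k2 : α → Int)
    (h1 : ∀ a, K1 (g a) = k1 a) (h2 : ∀ a, K2 (g a) = k2 a) (xs : List α) :
    PySem.List.sorted2 (xs.map g) K1 K2 = (PySem.List.sorted2 xs k1 k2).map g := by
  exact pv_foldl_insertBy_map g
    (fun a b => decide (K1 a < K1 b) || (!decide (K1 b < K1 a) && decide (K2 a < K2 b)))
    (fun a b => decide (k1 a < k1 b) || (!decide (k1 b < k1 a) && decide (k2 a < k2 b)))
    (fun a b => by simp [h1, h2]) xs []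

theorem pv_L_ne_nil_iff (L : List ((Int × Int) × String)) :
    ((PySem.Set.ofList (L.map (fun p => p.1))).map
      (fun k => (k, (L.filter (fun p => p.1 == k)).map (fun p => p.2))) = ([] : List ((Int × Int) × List String)))
      ↔ L = [] := by
  constructor
  · intro h
    cases L with
    | nil => rfl
    | cons p L' =>
      exfalso
      have hm : p.1 ∈ PySem.Set.ofList ((p :: L').map (fun p => p.1)) := by
        rw [PySem.Set.mem_ofList]; simp
      rcases List.eq_nil_or_concat (PySem.Set.ofList ((p :: L').map (fun p => p.1))) with he | _
      · rw [he] at hm; simp at hm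
      · rw [List.map_eq_nil_iff] at h
        rw [h] at hm; simp at hm
  · intro h; subst h; rfl

-- the sorted2 folds named with pvBfK / pvBfE comparators
theorem pv_sorted2K_eq (K : List (Int × Int)) :
    PySem.List.sorted2 K (fun k => k.1) (fun k => k.2)
      = K.foldl (fun acc x => PySem.List.insertBy pvBfK x acc) [] := rfl

theorem pv_sorted2E_eq (L : List ((Int × Int) × String)) :
    PySem.List.sorted2 L (fun e => e.1.1) (fun e => e.1.2)
      = L.foldl (fun acc x => PySem.List.insertBy pvBfE x acc) [] := rfl

-- insertBy helpers
theorem pv_insertBy_all_before {α : Type} (bf : α → α → Bool) (x : α) (l : List α)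
    (h : ∀ y ∈ l, bf x y = true) : PySem.List.insertBy bf x l = x :: l := by
  cases l with
  | nil => rfl
  | cons y ys => simp [PySem.List.insertBy, h y (by simp)]

theorem pv_insertBy_append_skip {α : Type} (bf : α → α → Bool) (x : α) :
    ∀ (as rest : List α), (∀ y ∈ as, bf x y = false) →
      PySem.List.insertBy bf x (as ++ rest) = as ++ PySem.List.insertBy bf x rest := by
  intro as
  induction as with
  | nil => intro rest _; rfl
  | cons a as ih =>
    intro rest h
    simp only [List.cons_append, PySem.List.insertBy, h a (by simp)]
    simp only [Bool.false_eq_true, if_false, List.cons.injEq, true_and]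
    exact ih rest (fun y hy => h y (by simp [hy]))

theorem pv_flatMap_congr {α β : Type} (ks : List α) (f g : α → List β)
    (h : ∀ k ∈ ks, f k = g k) : ks.flatMap f = ks.flatMap g := by
  induction ks with
  | nil => rfl
  | cons k ks ih =>
    simp only [List.flatMap_cons, h k (by simp)]
    rw [ih (fun k hk => h k (by simp [hk]))]

-- inserting an element into a flatMap of key-groups
theorem pv_ins_flatMap (p : (Int × Int) × String)
    (f : (Int × Int) → List ((Int × Int) × String)) :
    ∀ (ks : List (Int × Int)), ks.Pairwise pvLex →
      (∀ k ∈ ks, ∀ e ∈ f k, e.1 = k) →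
      PySem.List.insertBy pvBfE p (ks.flatMap f)
        = if p.1 ∈ ks
          then ks.flatMap (fun k => if k = p.1 then f k ++ [p] else f k)
          else (PySem.List.insertBy pvBfK p.1 ks).flatMap
                (fun k => if k = p.1 then [p] else f k) := by
  intro ks
  induction ks with
  | nil =>
    intro _ _
    simp [PySem.List.insertBy]
  | cons k ks ih =>
    intro hp hf
    have hkk : ∀ k' ∈ ks, pvLex k k' := (List.pairwise_cons.mp hp).1
    have hp' : ks.Pairwise pvLex := (List.pairwise_cons.mp hp).2
    have hfk : ∀ e ∈ f k, e.1 = k := hf k (by simp)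
    have hf' : ∀ k' ∈ ks, ∀ e ∈ f k', e.1 = k' := fun k' hk' => hf k' (by simp [hk'])
    by_cases h1 : pvLex p.1 k
    · -- p goes in front of everything
      have hall : ∀ e ∈ (k :: ks).flatMap f, pvBfE p e = true := by
        intro e he
        rw [List.mem_flatMap] at he
        obtain ⟨k', hk', he⟩ := he
        have hek : e.1 = k' := hf k' hk' e he
        have hlt : pvLex p.1 k' := by
          rcases List.mem_cons.mp hk' with rfl | hm
          · exact h1
          · exact pvLex_trans h1 (hkk k' hm)
        show pvBfK p.1 e.1 = true
        rw [hek]; exact (pvBfK_true_iff _ _).mpr hlt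
      rw [pv_insertBy_all_before _ _ _ hall]
      have hnm : p.1 ∉ k :: ks := by
        intro hm
        rcases List.mem_cons.mp hm with rfl | hm
        · exact pvLex_irrefl _ h1
        · exact pvLex_irrefl _ (pvLex_trans h1 (hkk _ hm))
      rw [if_neg hnm]
      rw [pv_insertBy_all_before _ _ _ (by
        intro y hy
        refine (pvBfK_true_iff _ _).mpr ?_
        rcases List.mem_cons.mp hy with rfl | hm
        · exact h1
        · exact pvLex_trans h1 (hkk _ hm))]
      have hne1 : ¬ (k = p.1) := by
        intro he; subst he; exact pvLex_irrefl _ h1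
      have hneks : ∀ k' ∈ ks, ¬ (k' = p.1) := by
        intro k' hk' he; subst he
        exact pvLex_irrefl _ (pvLex_trans h1 (hkk _ hk'))
      simp only [List.flatMap_cons]
      rw [pv_flatMap_congr ks (fun k' => if k' = p.1 then [p] else f k') f
          (fun k' hk' => if_neg (hneks k' hk'))]
      simp [hne1]
    · by_cases h2 : p.1 = k
      · -- p appends to the k-group
        have hskip : ∀ e ∈ f k, pvBfE p e = false := by
          intro e he
          show pvBfK p.1 e.1 = false
          rw [hfk e he, h2]
          exact (pvBfK_false_iff _ _).mpr (pvLex_irrefl _)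
        rw [List.flatMap_cons, pv_insertBy_append_skip _ _ _ _ hskip]
        have hall2 : ∀ e ∈ ks.flatMap f, pvBfE p e = true := by
          intro e he
          rw [List.mem_flatMap] at he
          obtain ⟨k', hk', he⟩ := he
          show pvBfK p.1 e.1 = true
          rw [hf' k' hk' e he, h2]
          exact (pvBfK_true_iff _ _).mpr (hkk k' hk')
        rw [pv_insertBy_all_before _ _ _ hall2]
        rw [if_pos (by simp [h2])]
        rw [List.flatMap_cons, if_pos h2.symm,
          pv_flatMap_congr ks (fun k' => if k' = p.1 then f k' ++ [p] else f k') f (by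
            intro k' hk'
            refine if_neg ?_
            intro he
            rw [he, h2] at hk'
            exact pvLex_irrefl k (hkk k hk'))]
        simp
      · -- p belongs further right
        have h3 : pvLex k p.1 := by
          rcases pvLex_total (a := k) (b := p.1) (fun he => h2 he.symm) with h | h
          · exact h
          · exact absurd h h1
        have hskip : ∀ e ∈ f k, pvBfE p e = false := by
          intro e he
          show pvBfK p.1 e.1 = false
          rw [hfk e he]
          exact (pvBfK_false_iff _ _).mpr h1
        rw [List.flatMap_cons, pv_insertBy_append_skip _ _ _ _ hskip,
          ih hp' hf']
        have hik : PySem.List.insertBy pvBfK p.1 (k :: ks)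
            = k :: PySem.List.insertBy pvBfK p.1 ks := by
          simp [PySem.List.insertBy, (pvBfK_false_iff p.1 k).mpr h1]
        by_cases hm : p.1 ∈ ks
        · rw [if_pos hm, if_pos (by simp [hm]), List.flatMap_cons,
            if_neg (fun he => h2 he.symm)]
        · rw [if_neg hm, if_neg (by
            intro hc
            rcases List.mem_cons.mp hc with he | hmm
            · exact h2 he
            · exact hm hmm)]
          rw [hik, List.flatMap_cons, if_neg (fun he => h2 he.symm)]

-- inserting a fresh key preserves strict lexicographic sortedness
theorem pv_ins_pairwise (x : Int × Int) :
    ∀ (ks : List (Int × Int)), ks.Pairwise pvLex → (∀ k ∈ ks, k ≠ x) →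
      (PySem.List.insertBy pvBfK x ks).Pairwise pvLex := by
  intro ks
  induction ks with
  | nil => intro _ _; simp [PySem.List.insertBy]
  | cons k ks ih =>
    intro hp hne
    have hkk : ∀ k' ∈ ks, pvLex k k' := (List.pairwise_cons.mp hp).1
    have hp' : ks.Pairwise pvLex := (List.pairwise_cons.mp hp).2
    by_cases hb : pvBfK x k = true
    · simp only [PySem.List.insertBy, hb, if_true]
      refine List.pairwise_cons.mpr ⟨?_, hp⟩
      intro y hy
      rcases List.mem_cons.mp hy with rfl | hm
      · exact (pvBfK_true_iff _ _).mp hb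
      · exact pvLex_trans ((pvBfK_true_iff _ _).mp hb) (hkk y hm)
    · simp only [PySem.List.insertBy, hb]
      refine List.pairwise_cons.mpr ⟨?_, ih hp' (fun k' hk' => hne k' (by simp [hk']))⟩
      intro y hy
      rcases (PySem.List.mem_insertBy _ _ _ _).mp hy with rfl | hm
      · rcases pvLex_total (hne k (by simp)) with h | h
        · exact h
        · exact absurd ((pvBfK_true_iff _ _).mpr h) hb
      · exact hkk y hm

-- the stable sort of the flat list is the flatMap of its per-key groups over the sorted keys
theorem pv_structure (L : List ((Int × Int) × String)) :
    ((PySem.Set.ofList (L.map (fun e => e.1))).foldl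
        (fun acc x => PySem.List.insertBy pvBfK x acc) []).Pairwise pvLex
    ∧ L.foldl (fun acc x => PySem.List.insertBy pvBfE x acc) []
        = ((PySem.Set.ofList (L.map (fun e => e.1))).foldl
            (fun acc x => PySem.List.insertBy pvBfK x acc) []).flatMap
            (fun k => L.filter (fun e => e.1 == k)) := by
  induction L using List.reverseRecOn with
  | nil => exact ⟨by simp, rfl⟩
  | append_singleton L p ih =>
    have hofl : PySem.Set.ofList ((L ++ [p]).map (fun e => e.1))
        = PySem.Set.add (PySem.Set.ofList (L.map (fun e => e.1))) p.1 := by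
      rw [PySem.Set.ofList_eq_foldl, List.map_append, List.foldl_append,
        ← PySem.Set.ofList_eq_foldl]
      rfl
    have hmemsk : ∀ k, k ∈ ((PySem.Set.ofList (L.map (fun e => e.1))).foldl
        (fun acc x => PySem.List.insertBy pvBfK x acc) [])
        ↔ k ∈ PySem.Set.ofList (L.map (fun e => e.1)) := by
      intro k
      rw [← pv_sorted2K_eq]
      exact (PySem.List.sorted2_perm _ _ _ _).mem_iff
    have hfkeys : ∀ k ∈ ((PySem.Set.ofList (L.map (fun e => e.1))).foldl
        (fun acc x => PySem.List.insertBy pvBfK x acc) []),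
        ∀ e ∈ L.filter (fun e => e.1 == k), e.1 = k := by
      intro k _ e he
      have := List.of_mem_filter he
      simpa using this
    have hfilt : ∀ k : Int × Int, (L ++ [p]).filter (fun e => e.1 == k)
        = L.filter (fun e => e.1 == k) ++ (if p.1 = k then [p] else []) := by
      intro k
      rw [List.filter_append]
      congr 1
      by_cases h : p.1 = k
      · simp [List.filter, h]
      · simp [List.filter, h, beq_eq_false_iff_ne.mpr h]
    by_cases hmem : p.1 ∈ PySem.Set.ofList (L.map (fun e => e.1))
    · have hadd : PySem.Set.add (PySem.Set.ofList (L.map (fun e => e.1))) p.1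
          = PySem.Set.ofList (L.map (fun e => e.1)) := by
        simp [PySem.Set.add, PySem.Set.contains, hmem]
      rw [hofl, hadd]
      refine ⟨ih.1, ?_⟩
      rw [List.foldl_append, List.foldl_cons, List.foldl_nil, ih.2,
        pv_ins_flatMap p _ _ ih.1 hfkeys,
        if_pos ((hmemsk p.1).mpr hmem),
        pv_flatMap_congr _ (fun k => (L ++ [p]).filter (fun e => e.1 == k))
          (fun k => if k = p.1 then L.filter (fun e => e.1 == k) ++ [p]
                    else L.filter (fun e => e.1 == k)) (by
          intro k hk
          simp only [hfilt k]
          by_cases h : k = p.1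
          · subst h; simp
          · simp [h, Ne.symm h])]
    · have hadd : PySem.Set.add (PySem.Set.ofList (L.map (fun e => e.1))) p.1
          = PySem.Set.ofList (L.map (fun e => e.1)) ++ [p.1] := by
        simp [PySem.Set.add, PySem.Set.contains, hmem]
      have hknp : ∀ k ∈ ((PySem.Set.ofList (L.map (fun e => e.1))).foldl
          (fun acc x => PySem.List.insertBy pvBfK x acc) []), k ≠ p.1 := by
        intro k hk he
        exact hmem (he ▸ (hmemsk k).mp hk)
      have hLfilt : L.filter (fun e => e.1 == p.1) = [] := by
        rw [List.filter_eq_nil_iff]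
        intro e he hbe
        refine hmem ?_
        rw [PySem.Set.mem_ofList]
        exact List.mem_map.mpr ⟨e, he, by simpa using hbe⟩
      have hsplit : (L ++ [p]).foldl (fun acc x => PySem.List.insertBy pvBfE x acc) []
          = PySem.List.insertBy pvBfE p
              (L.foldl (fun acc x => PySem.List.insertBy pvBfE x acc) []) := by
        rw [List.foldl_append]; rfl
      have hksplit : ((PySem.Set.ofList (L.map (fun e => e.1)) ++ [p.1]).foldl
            (fun acc x => PySem.List.insertBy pvBfK x acc) [])
          = PySem.List.insertBy pvBfK p.1
              ((PySem.Set.ofList (L.map (fun e => e.1))).foldl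
                (fun acc x => PySem.List.insertBy pvBfK x acc) []) := by
        rw [List.foldl_append]; rfl
      rw [hofl, hadd, hsplit, hksplit]
      refine ⟨pv_ins_pairwise p.1 _ ih.1 hknp, ?_⟩
      rw [ih.2, pv_ins_flatMap p _ _ ih.1 hfkeys,
        if_neg (fun hc => hmem ((hmemsk p.1).mp hc)),
        pv_flatMap_congr _ (fun k => (L ++ [p]).filter (fun e => e.1 == k))
          (fun k => if k = p.1 then [p] else L.filter (fun e => e.1 == k)) (by
          intro k hk
          simp only [hfilt k]
          by_cases h : k = p.1
          · subst h; simp [hLfilt]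
          · simp [h, Ne.symm h])]

-- characterisation of B's grouping step
theorem pv_gstep_concat (segs : List ((Int × Int) × List String)) (k : Int × Int)
    (cs : List String) (p : (Int × Int) × String) :
    pvGroupStep (segs ++ [(k, cs)]) p
      = if k = p.1 then segs ++ [(k, cs ++ [p.2])]
        else (segs ++ [(k, cs)]) ++ [(p.1, [p.2])] := by
  unfold pvGroupStep
  by_cases h : k = p.1 <;> simp [h]

-- consuming the rest of a run of equal keys
theorem pv_group_run (k : Int × Int) :
    ∀ (es : List ((Int × Int) × String)) (cs : List String)
      (segs : List ((Int × Int) × List String)), (∀ e ∈ es, e.1 = k) →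
      es.foldl pvGroupStep (segs ++ [(k, cs)])
        = segs ++ [(k, cs ++ es.map (fun e => e.2))] := by
  intro es
  induction es with
  | nil => intro cs segs _; simp
  | cons e es ih =>
    intro cs segs h
    have he : e.1 = k := h e (by simp)
    simp only [List.foldl_cons]
    rw [pv_gstep_concat, if_pos he.symm,
      ih (cs ++ [e.2]) segs (fun e' h' => h e' (by simp [h']))]
    simp

-- consuming whole groups, one new segment per key
theorem pv_group_blocks (f : (Int × Int) → List ((Int × Int) × String)) :
    ∀ (ks : List (Int × Int)) (segs : List ((Int × Int) × List String))
      (k : Int × Int) (cs : List String),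
      (∀ k' ∈ ks, k' ≠ k) → ks.Pairwise pvLex →
      (∀ k' ∈ ks, f k' ≠ [] ∧ ∀ e ∈ f k', e.1 = k') →
      (ks.flatMap f).foldl pvGroupStep (segs ++ [(k, cs)])
        = (segs ++ [(k, cs)]) ++ ks.map (fun k' => (k', (f k').map (fun e => e.2))) := by
  intro ks
  induction ks with
  | nil => intro segs k cs _ _ _; simp
  | cons k' ks ih =>
    intro segs k cs hne hp hfp
    obtain ⟨hfne, hfk⟩ := hfp k' (by simp)
    obtain ⟨e, es, hfe⟩ := List.exists_cons_of_ne_nil hfne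
    have hkk : ∀ k'' ∈ ks, pvLex k' k'' := (List.pairwise_cons.mp hp).1
    have hek : e.1 = k' := hfk e (by rw [hfe]; simp)
    rw [List.flatMap_cons, List.foldl_append, hfe]
    simp only [List.foldl_cons]
    rw [pv_gstep_concat, if_neg (fun hh => (hne k' (by simp)) (by
      rw [hek] at hh; exact hh.symm))]
    rw [hek,
      pv_group_run k' es [e.2] (segs ++ [(k, cs)])
        (fun e' h' => hfk e' (by rw [hfe]; simp [h'])),
      ih (segs ++ [(k, cs)]) k' ([e.2] ++ es.map (fun e => e.2))
        (fun k'' hk'' => (pvLex_ne (hkk k'' hk'')).symm)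
        (List.pairwise_cons.mp hp).2
        (fun k'' hk'' => hfp k'' (by simp [hk'']))]
    simp [hfe]

theorem pv_group_top (f : (Int × Int) → List ((Int × Int) × String))
    (ks : List (Int × Int)) (hp : ks.Pairwise pvLex)
    (hfp : ∀ k ∈ ks, f k ≠ [] ∧ ∀ e ∈ f k, e.1 = k) :
    (ks.flatMap f).foldl pvGroupStep []
      = ks.map (fun k => (k, (f k).map (fun e => e.2))) := by
  cases ks with
  | nil => rfl
  | cons k ks =>
    obtain ⟨hfne, hfk⟩ := hfp k (by simp)
    obtain ⟨e, es, hfe⟩ := List.exists_cons_of_ne_nil hfne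
    have hkk : ∀ k' ∈ ks, pvLex k k' := (List.pairwise_cons.mp hp).1
    have hek : e.1 = k := hfk e (by rw [hfe]; simp)
    rw [List.flatMap_cons, List.foldl_append, hfe]
    simp only [List.foldl_cons]
    have h0 : pvGroupStep [] e = [] ++ [(k, [e.2])] := by rw [← hek]; rfl
    rw [h0,
      pv_group_run k es [e.2] [] (fun e' h' => hfk e' (by rw [hfe]; simp [h'])),
      pv_group_blocks f ks [] k ([e.2] ++ es.map (fun e => e.2))
        (fun k' hk' => (pvLex_ne (hkk k' hk')).symm)
        (List.pairwise_cons.mp hp).2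
        (fun k' hk' => hfp k' (by simp [hk']))]
    simp [hfe]

-- ===== VERDICT (by name: the statement is the Claim_ definition above) =====
theorem compute_grid_diff_spec : Claim_equal_compute_grid_diff := by
  intro old_grid new_grid _
  unfold Spec_compute_grid_diff compute_grid_diff compute_grid_diff_alt
  by_cases hg : old_grid = [] ∨ new_grid = []
  · simp [hg]
  · simp only [if_neg hg]
    rw [pv_groups_eq, pv_items_eq]
    rw [show ((PySem.List.enumerate (old_grid.zip new_grid)).flatMap (fun rp =>
        ((PySem.List.enumerate (rp.2.1.zip rp.2.2)).filter (fun cp => cp.2.1 ≠ cp.2.2)).map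
          (fun cp => ((cp.2.1, cp.2.2),
            "(" ++ PySem.Int.toStr rp.1 ++ "," ++ PySem.Int.toStr cp.1 ++ ")"))))
        = pvL old_grid new_grid from rfl]
    set L := pvL old_grid new_grid with hL
    by_cases hnil : L = []
    · rw [if_pos ((pv_L_ne_nil_iff L).mpr hnil), if_pos hnil]
    · rw [if_neg (fun h => hnil ((pv_L_ne_nil_iff L).mp h)), if_neg hnil]
      rw [pv_sorted2_map (fun k => (k, (L.filter (fun p => p.1 == k)).map (fun p => p.2)))
        (fun it => it.1.1) (fun it => it.1.2) (fun k => k.1) (fun k => k.2)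
        (fun a => rfl) (fun a => rfl)]
      rw [pv_sorted2E_eq, (pv_structure L).2]
      have hperm : ∀ k, k ∈ ((PySem.Set.ofList (L.map (fun e => e.1))).foldl
          (fun acc x => PySem.List.insertBy pvBfK x acc) [])
          → k ∈ PySem.Set.ofList (L.map (fun e => e.1)) := by
        intro k hk
        rw [← pv_sorted2K_eq] at hk
        exact (PySem.List.sorted2_perm _ _ _ _).mem_iff.mp hk
      rw [pv_group_top _ _ (pv_structure L).1 (by
        intro k hk
        have hkK := hperm k hk
        rw [PySem.Set.mem_ofList] at hkK
        obtain ⟨e, he, hek⟩ := List.mem_map.mp hkK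
        constructor
        · exact List.ne_nil_of_mem (List.mem_filter.mpr ⟨he, by simp [hek]⟩)
        · intro e' he'
          have := List.of_mem_filter he'
          simpa using this)]
      rw [pv_sorted2K_eq, List.map_map]
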